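-- pv_equiv track=rewrite | github.com/timjonkerpostnl/advent_of_code | src/day14/assignment2.py | shift_rocks_row
-- ===== SOURCE A (Python) =====
-- def shift_rocks_row(row):
--     row.append("#")
--     row.insert(0, "#")
--     obstacles = [index for index, char in enumerate(row) if char == "#"]
--     for obstacle1, obstacle2 in zip(obstacles[:-1], obstacles[1:]):
--         num_rocks_in_between = sum(1 for x in row[obstacle1:obstacle2] if x == "O")
--         last_rock_position = obstacle1 + num_rocks_in_between
--         row[obstacle1 + 1 : last_rock_position + 1] = ["O"] * num_rocks_in_between
--         row[last_rock_position + 1 : obstacle2] = ["."] * (obstacle2 - 1 - last_rock_position)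
--     return row[1:-1]
-- ===== SOURCE B (Python) =====
-- # Single left-to-right pass with running segment counters; builds the output
-- # fresh and does NOT mutate its argument (A pads and rewrites `row` in place).
-- def shift_rocks_row(row):
--     out = []
--     seglen = 0
--     rocks = 0
--     for c in row:
--         if c == "#":
--             out += ["O"] * rocks + ["."] * (seglen - rocks) + ["#"]
--             seglen = 0
--             rocks = 0
--         else:
--             seglen += 1
--             if c == "O":
--                 rocks += 1
--     out += ["O"] * rocks + ["."] * (seglen - rocks)
--     return out
-- ===== Notes on version B (the rewrite author's own statement) =====
-- stated objective: simpler
-- what changed: Replaces A's sentinel padding, obstacle-index list, zip of adjacent obstacles and per-segment slice reassignments with a single left-to-right pass that keeps per-segment length/rock counters and emits 'O'*rocks + '.'*(len-rocks) at each '#' and at the end; B builds the output fresh and does not mutate its argument (A rewrites the list in place).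
import Mathlib
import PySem

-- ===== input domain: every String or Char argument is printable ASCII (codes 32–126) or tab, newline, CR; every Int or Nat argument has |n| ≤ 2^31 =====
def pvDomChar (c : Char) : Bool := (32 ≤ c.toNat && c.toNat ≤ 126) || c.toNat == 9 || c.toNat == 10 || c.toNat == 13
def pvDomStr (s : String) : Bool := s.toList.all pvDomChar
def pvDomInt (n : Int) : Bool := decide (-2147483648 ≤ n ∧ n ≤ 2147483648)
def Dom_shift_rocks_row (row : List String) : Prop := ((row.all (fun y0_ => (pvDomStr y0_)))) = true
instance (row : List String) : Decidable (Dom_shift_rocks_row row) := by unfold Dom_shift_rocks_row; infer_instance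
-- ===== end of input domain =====

-- B replaces A's obstacle-index list and slice reassignments on a sentinel-padded row by a
-- single left-to-right pass with per-segment counters (objective: simpler).  Equivalence is
-- about the RETURN value: A pads and rewrites its argument in place, B does not mutate it.

-- ===== PORT A =====
-- Python `r[a:b] = v` (step 1), ported by hand (PySem has no slice assignment): exact Python
-- semantics — both bounds are clamped like slice bounds, and if the clamped stop is below the
-- clamped start the assignment inserts at the start position (hence the `max`).
def pySetSlice (r : List String) (a b : Int) (v : List String) : List String :=
  r.take (PySem.List.clampIdx r.length a) ++ v ++
    r.drop (max (PySem.List.clampIdx r.length a) (PySem.List.clampIdx r.length b))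

-- the body of A's `for obstacle1, obstacle2 in zip(...)` loop
def stepA (r : List String) (ob : Int × Int) : List String :=
  let num := (PySem.List.slice r (some ob.1) (some ob.2)).count "O"
  let last := ob.1 + (num : Int)
  let r1 := pySetSlice r (ob.1 + 1) (last + 1) (List.replicate num "O")
  pySetSlice r1 (last + 1) ob.2 (List.replicate (ob.2 - 1 - last).toNat ".")

def shift_rocks_row (row : List String) : List String :=
  let row1 := row ++ ["#"]                                  -- row.append("#")
  let row2 := "#" :: row1                                   -- row.insert(0, "#")
  let obstacles : List Int :=
    (PySem.List.enumerate row2 0).filterMap (fun ic => if ic.2 == "#" then some ic.1 else none)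
  let row3 := ((PySem.List.slice obstacles none (some (-1))).zip
                 (PySem.List.slice obstacles (some 1) none)).foldl stepA row2
  PySem.List.slice row3 (some 1) (some (-1))

-- ===== PORT B =====
-- the body of B's `for c in row` loop; state = (out, seglen, rocks)
def stepB (acc : List String × Nat × Nat) (c : String) : List String × Nat × Nat :=
  if c == "#" then
    (acc.1 ++ List.replicate acc.2.2 "O" ++ List.replicate (acc.2.1 - acc.2.2) "." ++ ["#"], 0, 0)
  else
    (acc.1, acc.2.1 + 1, acc.2.2 + (if c == "O" then 1 else 0))

def shift_rocks_row_alt (row : List String) : List String :=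
  let acc := row.foldl stepB ([], 0, 0)
  acc.1 ++ List.replicate acc.2.2 "O" ++ List.replicate (acc.2.1 - acc.2.2) "."

-- ===== PRECONDITION & SPEC =====
def Spec_shift_rocks_row (row : List String) (out : List String) : Prop := out = shift_rocks_row_alt row
instance (row : List String) (out : List String) : Decidable (Spec_shift_rocks_row row out) := by unfold Spec_shift_rocks_row; infer_instance

-- ===== CLAIM (what is proved, stated in full; the proofs are below) =====
def Claim_equal_shift_rocks_row : Prop := ∀ (row : List String), Dom_shift_rocks_row row → Spec_shift_rocks_row row (shift_rocks_row row)

-- ===== LEMMAS AND PROOFS =====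

-- `pack seg` = the rocks of a '#'-free segment rolled to its left edge
def pack (l : List String) : List String :=
  List.replicate (l.count "O") "O" ++ List.replicate (l.length - l.count "O") "."

-- canonical tilted row: every maximal '#'-free segment packed
def canon (l : List String) : List String :=
  let seg := l.takeWhile (fun c => c ≠ "#")
  match hr : l.dropWhile (fun c => c ≠ "#") with
  | [] => pack seg
  | _ :: t => pack seg ++ "#" :: canon t
termination_by l.length
decreasing_by
  have h1 : (l.dropWhile (fun c => c ≠ "#")).length ≤ l.length :=
    List.length_dropWhile_le _ _
  rw [hr] at h1; simp at h1 ⊢; omega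

-- positions of '#'
def obsR : List String → List Nat
  | [] => []
  | c :: l => if c = "#" then 0 :: (obsR l).map (· + 1) else (obsR l).map (· + 1)

lemma length_pack (l : List String) : (pack l).length = l.length := by
  have := List.count_le_length (l := l) (a := "O")
  simp [pack]; omega

lemma tw (seg rest : List String) (h : "#" ∉ seg) :
    (seg ++ "#" :: rest).takeWhile (fun c => c ≠ "#") = seg := by
  rw [List.takeWhile_append]; simp only [List.takeWhile_cons, decide_not]
  simp [List.takeWhile_eq_self_iff]; aesop

lemma dw (seg rest : List String) (h : "#" ∉ seg) :
    (seg ++ "#" :: rest).dropWhile (fun c => c ≠ "#") = "#" :: rest := by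
  rw [List.dropWhile_append]; simp [List.dropWhile_eq_nil_iff]; aesop

lemma tw0 (l : List String) (h : "#" ∉ l) : l.takeWhile (fun c => c ≠ "#") = l := by
  rw [List.takeWhile_eq_self_iff]; aesop

lemma dw0 (l : List String) (h : "#" ∉ l) : l.dropWhile (fun c => c ≠ "#") = [] := by
  rw [List.dropWhile_eq_nil_iff]; aesop

lemma dropWhile_hash (l : List String) (h : "#" ∈ l) :
    ∃ t, l.dropWhile (fun c => c ≠ "#") = "#" :: t := by
  induction l with
  | nil => simp at h
  | cons c l ih =>
    by_cases hc : c = "#"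
    · exact ⟨l, by simp [List.dropWhile, hc]⟩
    · have hm : "#" ∈ l := by
        rcases List.mem_cons.mp h with h | h
        · exact absurd h.symm hc
        · exact h
      rcases ih hm with ⟨t, ht⟩
      refine ⟨t, ?_⟩
      simpa [List.dropWhile, hc] using ht

lemma not_hash_mem_takeWhile (l : List String) : "#" ∉ l.takeWhile (fun c => c ≠ "#") := by
  intro hm
  have := List.mem_takeWhile_imp hm
  simp at this

lemma canon_no_hash (l : List String) (h : "#" ∉ l) : canon l = pack l := by
  rw [canon]; split
  · rw [tw0 l h]
  · next x t hr => rw [dw0 l h] at hr; cases hr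

lemma canon_split (seg rest : List String) (h : "#" ∉ seg) :
    canon (seg ++ "#" :: rest) = pack seg ++ "#" :: canon rest := by
  rw [canon]; split
  · next hr => rw [dw _ _ h] at hr; cases hr
  · next x t hr =>
      rw [dw _ _ h] at hr
      cases hr
      rw [tw _ _ h]

-- ---- B side ----

lemma foldB_no_hash (seg : List String) (h : "#" ∉ seg) :
    ∀ (o : List String) (s r : Nat),
      seg.foldl stepB (o, s, r) = (o, s + seg.length, r + seg.count "O") := by
  induction seg with
  | nil => simp
  | cons c seg ih =>
    intro o s r
    have hc : ¬ (c == "#") := by simp; exact fun e => h (by simp [e])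
    have hs : "#" ∉ seg := fun hm => h (by simp [hm])
    simp only [List.foldl_cons, stepB, hc, List.count_cons, ih hs]
    refine Prod.ext rfl (Prod.ext ?_ ?_) <;> simp
    · omega
    · by_cases hco : c = "O" <;> simp [hco] <;> omega

lemma foldB_main : ∀ (n : Nat) (l : List String), l.length ≤ n → ∀ (o : List String),
    (fun acc : List String × Nat × Nat =>
      acc.1 ++ List.replicate acc.2.2 "O" ++ List.replicate (acc.2.1 - acc.2.2) ".")
      (l.foldl stepB (o, 0, 0)) = o ++ canon l := by
  intro n
  induction n with
  | zero =>
    intro l hl o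
    have : l = [] := List.length_eq_zero_iff.mp (Nat.le_zero.mp hl)
    subst this
    simp [canon, pack]
  | succ n ih =>
    intro l hl o
    by_cases h : "#" ∈ l
    · obtain ⟨t, ht⟩ := dropWhile_hash l h
      set seg := l.takeWhile (fun c => c ≠ "#") with hseg
      have hsplit : l = seg ++ "#" :: t := by
        rw [hseg, ← ht, List.takeWhile_append_dropWhile]
      have hnh : "#" ∉ seg := not_hash_mem_takeWhile l
      rw [hsplit, canon_split _ _ hnh, List.foldl_append, foldB_no_hash seg hnh]
      have hstep : List.foldl stepB (o, 0 + seg.length, 0 + seg.count "O") ("#" :: t)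
          = List.foldl stepB (o ++ pack seg ++ ["#"], 0, 0) t := by
        simp [stepB, pack]
      rw [hstep, ih]
      · simp
      · have hlen : l.length = seg.length + t.length + 1 := by
          rw [hsplit]; simp; omega
        omega
    · rw [foldB_no_hash l h o 0 0, canon_no_hash l h]
      simp [pack]

lemma alt_eq_canon (row : List String) : shift_rocks_row_alt row = canon row := by
  have := foldB_main row.length row le_rfl []
  simpa [shift_rocks_row_alt] using this

-- ---- A side ----

lemma obsR_append_no_hash (s l : List String) (h : "#" ∉ s) :
    obsR (s ++ l) = (obsR l).map (· + s.length) := by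
  induction s with
  | nil => simp
  | cons c s ih =>
    have hc : ¬ c = "#" := fun e => h (by simp [e])
    have hs : "#" ∉ s := fun hm => h (by simp [hm])
    simp [obsR, hc, ih hs, List.map_map, Function.comp]

lemma obstacles_eq (l : List String) : ∀ (s : Int),
    (PySem.List.enumerate l s).filterMap (fun ic => if ic.2 == "#" then some ic.1 else none)
      = (obsR l).map (fun n : Nat => s + (n : Int)) := by
  induction l with
  | nil => intro s; simp [PySem.List.enumerate_nil, obsR]
  | cons c l ih =>
    intro s
    rw [PySem.List.enumerate_cons, List.filterMap_cons, ih (s+1)]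
    by_cases hc : c = "#"
    · subst hc
      simp only [obsR, if_pos rfl, List.map_cons]
      simp only [beq_self_eq_true, if_pos]
      refine congrArg₂ _ (by simp) ?_
      rw [List.map_map]; apply List.map_congr_left
      intro a _; simp [Function.comp]; push_cast; ring
    · have hb : (c == "#") = false := by simp [hc]
      simp only [obsR, if_neg hc, hb, Bool.false_eq_true, if_false]
      rw [List.map_map]; apply List.map_congr_left
      intro a _; simp [Function.comp]; push_cast; ring

lemma pySetSlice_shift (p l : List String) (a b : Nat) (v : List String) :
    pySetSlice (p ++ l) ((p.length + a : Nat) : Int) ((p.length + b : Nat) : Int) v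
      = p ++ pySetSlice l ((a : Nat) : Int) ((b : Nat) : Int) v := by
  simp only [pySetSlice, PySem.List.clampIdx_natCast, List.length_append]
  have h1 : min (p.length + a) (p.length + l.length) = p.length + min a l.length := by omega
  have h2 : min (p.length + b) (p.length + l.length) = p.length + min b l.length := by omega
  rw [h1, h2]
  have h3 : max (p.length + min a l.length) (p.length + min b l.length)
      = p.length + max (min a l.length) (min b l.length) := by omega
  rw [h3, List.take_length_add_append, List.drop_length_add_append]
  simp [List.append_assoc]

lemma stepA_shift (p l : List String) (a b : Nat) :
    stepA (p ++ l) (((p.length + a : Nat) : Int), ((p.length + b : Nat) : Int))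
      = p ++ stepA l ((a : Int), (b : Int)) := by
  simp only [stepA]
  have hnum : (PySem.List.slice (p ++ l) (some ((p.length + a : Nat) : Int))
        (some ((p.length + b : Nat) : Int))).count "O"
      = (PySem.List.slice l (some ((a : Nat) : Int)) (some ((b : Nat) : Int))).count "O" := by
    rw [PySem.List.slice_natCast, PySem.List.slice_natCast, List.drop_length_add_append]
    congr 2
    omega
  rw [hnum]
  set n := (PySem.List.slice l (some ((a : Nat) : Int)) (some ((b : Nat) : Int))).count "O" with hn
  have e1 : ((p.length + a : Nat) : Int) + 1 = ((p.length + (a + 1) : Nat) : Int) := by push_cast; ring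
  have e2 : ((p.length + a : Nat) : Int) + (n : Int) + 1
      = ((p.length + (a + n + 1) : Nat) : Int) := by push_cast; ring
  have e3 : ((a : Nat) : Int) + 1 = (((a + 1 : Nat)) : Int) := by push_cast; ring
  have e4 : ((a : Nat) : Int) + (n : Int) + 1 = (((a + n + 1 : Nat)) : Int) := by push_cast; ring
  have e5 : (((p.length + b : Nat) : Int) - 1 - (((p.length + a : Nat) : Int) + (n : Int))).toNat
      = (((b : Nat) : Int) - 1 - (((a : Nat) : Int) + (n : Int))).toNat := by push_cast; omega
  rw [e1, e2, e3, e4, e5, pySetSlice_shift, pySetSlice_shift]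

lemma pySetSlice_natCast (r : List String) (a b : Nat) (v : List String) :
    pySetSlice r ((a : Nat) : Int) ((b : Nat) : Int) v
      = r.take (min a r.length) ++ v ++ r.drop (max (min a r.length) (min b r.length)) := by
  simp [pySetSlice, PySem.List.clampIdx_natCast]

lemma stepA_first (seg rest : List String) :
    stepA ("#" :: seg ++ "#" :: rest) (0, ((seg.length + 1 : Nat) : Int))
      = "#" :: pack seg ++ "#" :: rest := by
  have hm : seg.count "O" ≤ seg.length := List.count_le_length
  set m := seg.count "O" with hmdef
  have hnum : (PySem.List.slice ("#" :: seg ++ "#" :: rest) (some (0 : Int))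
      (some ((seg.length + 1 : Nat) : Int))).count "O" = m := by
    have h0 : (0 : Int) = ((0 : Nat) : Int) := rfl
    rw [h0, PySem.List.slice_natCast]
    simp only [List.drop_zero]
    have ht : ("#" :: seg ++ "#" :: rest).take (seg.length + 1 - 0) = "#" :: seg := by
      simp only [Nat.sub_zero]
      have hl : ("#" :: seg).length = seg.length + 1 := by simp
      exact List.take_left' hl
    rw [ht]
    simp [hmdef]
  simp only [stepA, hnum]
  have e1 : (0 : Int) + 1 = ((1 : Nat) : Int) := by norm_num
  have e2 : (0 : Int) + (m : Int) + 1 = ((m + 1 : Nat) : Int) := by push_cast; ring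
  have e3 : (((seg.length + 1 : Nat) : Int) - 1 - ((0 : Int) + (m : Int))).toNat
      = seg.length - m := by push_cast; omega
  rw [e1, e2, e3]
  have hlen : ("#" :: seg ++ "#" :: rest).length = seg.length + rest.length + 2 := by
    simp; omega
  have hstep1 : pySetSlice ("#" :: seg ++ "#" :: rest) ((1 : Nat) : Int) ((m + 1 : Nat) : Int)
        (List.replicate m "O")
      = ("#" :: List.replicate m "O" ++ seg.drop m) ++ "#" :: rest := by
    rw [pySetSlice_natCast]
    have h1 : min 1 ("#" :: seg ++ "#" :: rest).length = 1 := by rw [hlen]; omega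
    have h2 : min (m + 1) ("#" :: seg ++ "#" :: rest).length = m + 1 := by rw [hlen]; omega
    rw [h1, h2]
    have h3 : max 1 (m + 1) = m + 1 := by omega
    rw [h3]
    have ht1 : ("#" :: seg ++ "#" :: rest).take 1 = ["#"] := by simp
    have hd1 : ("#" :: seg ++ "#" :: rest).drop (m + 1) = seg.drop m ++ "#" :: rest := by
      have hc : ("#" :: seg ++ "#" :: rest) = "#" :: (seg ++ "#" :: rest) := by simp
      rw [hc, List.drop_succ_cons, List.drop_append_of_le_length hm]
    rw [ht1, hd1]
    simp
  rw [hstep1, pySetSlice_natCast]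
  have hplen : ("#" :: List.replicate m "O" ++ seg.drop m).length = seg.length + 1 := by
    simp; omega
  have hr1len : (("#" :: List.replicate m "O" ++ seg.drop m) ++ "#" :: rest).length
      = seg.length + rest.length + 2 := by simp; omega
  have g1 : min (m + 1) ((("#" :: List.replicate m "O" ++ seg.drop m) ++ "#" :: rest)).length
      = m + 1 := by rw [hr1len]; omega
  have g2 : min (seg.length + 1) ((("#" :: List.replicate m "O" ++ seg.drop m) ++ "#" :: rest)).length
      = seg.length + 1 := by rw [hr1len]; omega
  rw [g1, g2]
  have g3 : max (m + 1) (seg.length + 1) = seg.length + 1 := by omega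
  rw [g3]
  have gt : (("#" :: List.replicate m "O" ++ seg.drop m) ++ "#" :: rest).take (m + 1)
      = "#" :: List.replicate m "O" := by
    have hpre : ("#" :: List.replicate m "O").length = m + 1 := by simp
    have assoc : ("#" :: List.replicate m "O" ++ seg.drop m) ++ "#" :: rest
        = ("#" :: List.replicate m "O") ++ (seg.drop m ++ "#" :: rest) := by simp
    rw [assoc, List.take_left' hpre]
  have gd : (("#" :: List.replicate m "O" ++ seg.drop m) ++ "#" :: rest).drop (seg.length + 1)
      = "#" :: rest := by
    exact List.drop_left' hplen
  rw [gt, gd]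
  simp [pack, ← hmdef]

lemma foldA_shift (p : List String) (ps : List (Nat × Nat)) :
    ∀ (l : List String),
    (ps.map (fun q : Nat × Nat => (((p.length + q.1 : Nat) : Int), ((p.length + q.2 : Nat) : Int)))).foldl
        stepA (p ++ l)
      = p ++ (ps.map (fun q : Nat × Nat => ((q.1 : Int), (q.2 : Int)))).foldl stepA l := by
  induction ps with
  | nil => intro l; simp
  | cons q ps ih =>
    intro l
    simp only [List.map_cons, List.foldl_cons]
    rw [stepA_shift, ih]

lemma zip_dropLast_tail {α : Type} : ∀ (l : List α), l.dropLast.zip l.tail = l.zip l.tail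
  | [] => rfl
  | [a] => by simp
  | a :: b :: t => by
    have := zip_dropLast_tail (b :: t)
    simp only [List.tail_cons] at this ⊢
    rw [List.dropLast_cons₂, List.zip_cons_cons, this]
    simp [List.zip_cons_cons]

lemma obsR_hash_cons (l : List String) :
    obsR ("#" :: l) = 0 :: (obsR l).map (· + 1) := by simp [obsR]

lemma procA_nohash (t : List String) (h : "#" ∉ t) :
    ((((obsR ("#" :: t ++ ["#"])).map (fun k : Nat => (k : Int))).dropLast.zip
        (((obsR ("#" :: t ++ ["#"])).map (fun k : Nat => (k : Int))).tail)).foldl stepA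
        ("#" :: t ++ ["#"]))
      = "#" :: canon t ++ ["#"] := by
  have hobs : obsR ("#" :: t ++ ["#"]) = [0, t.length + 1] := by
    have h1 : ("#" :: t ++ ["#"]) = "#" :: (t ++ ["#"]) := by simp
    rw [h1, obsR_hash_cons, obsR_append_no_hash t ["#"] h]
    simp [obsR]
  rw [hobs, canon_no_hash t h]
  simp only [List.map_cons, List.map_nil, List.dropLast_cons₂, List.dropLast_singleton,
    List.tail_cons, List.zip_cons_cons, List.zip_nil_right, List.foldl_cons, List.foldl_nil]
  have h0 : (((0 : Nat)) : Int) = (0 : Int) := rfl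
  rw [h0]
  exact stepA_first t []

lemma procA_main : ∀ (n : Nat) (t : List String), t.length ≤ n →
    ((((obsR ("#" :: t ++ ["#"])).map (fun k : Nat => (k : Int))).dropLast.zip
        (((obsR ("#" :: t ++ ["#"])).map (fun k : Nat => (k : Int))).tail)).foldl stepA
        ("#" :: t ++ ["#"]))
      = "#" :: canon t ++ ["#"] := by
  intro n
  induction n with
  | zero =>
    intro t ht
    have : t = [] := List.length_eq_zero_iff.mp (Nat.le_zero.mp ht)
    subst this
    exact procA_nohash [] (by simp)
  | succ n ih =>
    intro t ht
    by_cases h : "#" ∈ t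
    · obtain ⟨u, hu⟩ := dropWhile_hash t h
      set seg := t.takeWhile (fun c => c ≠ "#") with hseg
      have hsplit : t = seg ++ "#" :: u := by
        rw [hseg, ← hu, List.takeWhile_append_dropWhile]
      have hnh : "#" ∉ seg := not_hash_mem_takeWhile t
      have hlen : t.length = seg.length + u.length + 1 := by rw [hsplit]; simp; omega
      set k := seg.length + 1 with hk
      set Y := obsR ("#" :: (u ++ ["#"])) with hY
      obtain ⟨Y', hY'⟩ : ∃ Y', Y = 0 :: Y' :=
        ⟨(obsR (u ++ ["#"])).map (· + 1), by rw [hY]; simp [obsR]⟩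
      -- the padded row, re-associated
      have hpad : ("#" :: t ++ ["#"]) = "#" :: seg ++ "#" :: (u ++ ["#"]) := by
        rw [hsplit]; simp
      -- obstacle positions
      have hobs : obsR ("#" :: t ++ ["#"]) = 0 :: Y.map (· + k) := by
        have h1 : ("#" :: t ++ ["#"]) = "#" :: (seg ++ ("#" :: (u ++ ["#"]))) := by
          rw [hsplit]; simp
        rw [h1, obsR_hash_cons, obsR_append_no_hash seg _ hnh, ← hY, List.map_map]
        refine congrArg _ (List.map_congr_left ?_)
        intro a _; simp [hk]; omega
      set c : Nat → Int := fun j : Nat => (j : Int) with hc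
      set f : Nat → Int := fun j : Nat => ((j + k : Nat) : Int) with hf
      have hmapf : (0 :: Y.map (· + k)).map c = 0 :: Y.map f := by
        simp only [List.map_cons, List.map_map]
        refine congrArg₂ _ rfl (List.map_congr_left ?_)
        intro a _; simp [hc, hf, Function.comp]
      -- the zipped pairs
      have hzip : (((0 :: Y.map (· + k)).map c).dropLast.zip (((0 :: Y.map (· + k)).map c).tail))
          = ((0 : Int), ((k : Nat) : Int)) ::
              (Y.zip Y.tail).map (fun q : Nat × Nat => (f q.1, f q.2)) := by
        rw [hmapf, zip_dropLast_tail]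
        rw [hY']
        simp only [List.map_cons, List.tail_cons, List.zip_cons_cons]
        refine congrArg₂ _ (by simp [hf]) ?_
        have hzm : (f 0 :: Y'.map f).zip (Y'.map f) = ((0 :: Y').map f).zip (Y'.map f) := by simp
        rw [hzm, List.zip_map]
        simp [Prod.map]
      rw [hobs, hzip, hpad, List.foldl_cons]
      have h00 : ((0 : Int), ((k : Nat) : Int)) = ((0 : Int), ((seg.length + 1 : Nat) : Int)) := by
        rw [hk]
      rw [h00, stepA_first seg (u ++ ["#"])]
      -- peel off the finished prefix
      set p := "#" :: pack seg with hp
      have hplen : p.length = k := by simp [hp, length_pack, hk]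
      have hassoc : ("#" :: pack seg ++ "#" :: (u ++ ["#"]))
          = p ++ ("#" :: (u ++ ["#"])) := by simp [hp]
      have hpairs : (Y.zip Y.tail).map (fun q : Nat × Nat => (f q.1, f q.2))
          = (Y.zip Y.tail).map (fun q : Nat × Nat =>
              (((p.length + q.1 : Nat) : Int), ((p.length + q.2 : Nat) : Int))) := by
        refine List.map_congr_left ?_
        intro q _
        simp [hf, hplen]
        constructor <;> push_cast <;> ring
      rw [hassoc, hpairs, foldA_shift]
      -- the remaining loop is exactly the recursive instance on u
      have hIH := ih u (by omega)
      have hY2 : obsR ("#" :: u ++ ["#"]) = Y := by rw [hY]; rfl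
      rw [hY2, zip_dropLast_tail, ← List.map_tail, List.zip_map] at hIH
      have hIH' : ((Y.zip Y.tail).map (fun q : Nat × Nat => ((q.1 : Int), (q.2 : Int)))).foldl
          stepA ("#" :: (u ++ ["#"])) = "#" :: canon u ++ ["#"] := by
        rw [← hIH]
        refine congrArg₂ _ rfl (List.map_congr_left ?_)
        intro q _; simp [Prod.map, hc]
      rw [hIH']
      rw [hsplit, canon_split _ _ hnh]
      simp [hp]
    · exact procA_nohash t h

lemma slice_unpad (m : List String) :
    PySem.List.slice ("#" :: m ++ ["#"]) (some 1) (some (-1)) = m := by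
  simp [PySem.List.slice]

lemma a_eq_canon (row : List String) : shift_rocks_row row = canon row := by
  show PySem.List.slice _ (some 1) (some (-1)) = canon row
  simp only [obstacles_eq ("#" :: (row ++ ["#"])) 0, PySem.List.slice_to_neg_one,
    PySem.List.slice_from_one]
  have hmap : (obsR ("#" :: (row ++ ["#"]))).map (fun n : Nat => (0 : Int) + (n : Int))
      = (obsR ("#" :: row ++ ["#"])).map (fun k : Nat => (k : Int)) := by
    refine List.map_congr_left ?_
    intro a _; simp
  rw [hmap]
  have hpad : ("#" :: (row ++ ["#"])) = ("#" :: row ++ ["#"]) := by simp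
  rw [hpad, procA_main row.length row le_rfl, slice_unpad]

-- ===== VERDICT (by name: the statement is the Claim_ definition above) =====
theorem shift_rocks_row_spec : Claim_equal_shift_rocks_row := by
  intro row _
  unfold Spec_shift_rocks_row
  rw [a_eq_canon, alt_eq_canon]
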